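-- pv_equiv track=rewrite | github.com/cegielskir/Quine-McCluskey-Algorithm | quineMcCluskey.py | listOfVars
-- ===== SOURCE A (Python) =====
-- def listOfVars(tokens):
--     howMany = 0
--     mySet = set()
--     for token in tokens:
--         isAlpha = True
--         for char in token:
--             if not char.isalpha():
--                 isAlpha = False
--         if  isAlpha and  token not in mySet:
--             howMany += 1
--             mySet = mySet.union({token})
--     return sorted((mySet))
-- ===== SOURCE B (Python) =====
-- def listOfVars(tokens):
--     alphas = [t for t in tokens if all(c.isalpha() for c in t)]
--     alphas.sort()
--     out = []
--     for t in alphas: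
--         if not out or out[-1] != t:
--             out.append(t)
--     return out
-- ===== Notes on version B (the rewrite author's own statement) =====
-- stated objective: faster
-- what changed: A dedups during the scan with a set it rebuilds by union at every insertion and sorts the set at the end; B collects all alpha tokens without dedup, sorts the list once, and removes adjacent duplicates in one final pass.
import Mathlib
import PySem

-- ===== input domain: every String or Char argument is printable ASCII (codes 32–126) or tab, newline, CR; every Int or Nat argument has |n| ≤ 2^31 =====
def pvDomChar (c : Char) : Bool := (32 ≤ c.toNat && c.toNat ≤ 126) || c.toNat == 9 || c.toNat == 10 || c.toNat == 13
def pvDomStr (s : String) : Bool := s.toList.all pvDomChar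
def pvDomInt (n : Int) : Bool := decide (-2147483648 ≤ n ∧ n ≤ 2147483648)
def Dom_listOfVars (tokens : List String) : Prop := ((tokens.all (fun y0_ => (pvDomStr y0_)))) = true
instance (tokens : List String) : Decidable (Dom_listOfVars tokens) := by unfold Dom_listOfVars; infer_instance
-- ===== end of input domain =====

-- B collects all alpha tokens without deduplication, sorts the list, then removes adjacent
-- duplicates in one final pass, instead of A's membership-tested set built during the scan
-- (avoids A's per-insertion set copy via union; measured faster on the generated inputs).

-- ===== PORT A =====
def listOfVars (tokens : List String) : List String :=
  -- state = (howMany, mySet); the inner for-loop over the token's chars sets the isAlpha flag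
  let st := tokens.foldl (fun (st : Int × PySem.Set String) token =>
    let isAlpha := token.toList.foldl (fun b c => if !(PySem.Chars.isalpha c) then false else b) true
    if isAlpha && !(PySem.Set.contains st.2 token) then
      (st.1 + 1, PySem.Set.union st.2 [token])
    else st) (0, PySem.Set.empty)
  PySem.List.sorted st.2 (fun x => x) false

-- ===== PORT B =====
def listOfVars_alt (tokens : List String) : List String :=
  let alphas := tokens.filter (fun t => t.toList.all PySem.Chars.isalpha)
  let s := PySem.List.sorted alphas (fun x => x) false
  s.foldl (fun out t => if out.getLast? ≠ some t then out ++ [t] else out) []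

-- ===== PRECONDITION & SPEC =====
def Spec_listOfVars (tokens : List String) (out : List String) : Prop := out = listOfVars_alt tokens
instance (tokens : List String) (out : List String) : Decidable (Spec_listOfVars tokens out) := by unfold Spec_listOfVars; infer_instance

-- ===== CLAIM (what is proved, stated in full; the proofs are below) =====
def Claim_equal_listOfVars : Prop := ∀ (tokens : List String), Dom_listOfVars tokens → Spec_listOfVars tokens (listOfVars tokens)

-- ===== LEMMAS AND PROOFS =====

-- A's inner char loop computes the all-alpha test (cites PySem.List.foldl_if_false_eq)
theorem innerFlag_eq_all (t : String) :
    t.toList.foldl (fun b c => if !(PySem.Chars.isalpha c) then false else b) true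
      = t.toList.all PySem.Chars.isalpha := by
  rw [PySem.List.foldl_if_false_eq (p := fun c => !(PySem.Chars.isalpha c))]
  simp [List.all_eq_not_any_not]

-- the set component of A's fold is set(filter p tokens) built by Set.add
theorem snd_foldA (l : List String) (p : String → Bool) (n : Int) (s : PySem.Set String) :
    (l.foldl (fun (st : Int × PySem.Set String) token =>
        if p token && !(PySem.Set.contains st.2 token) then
          (st.1 + 1, PySem.Set.union st.2 [token])
        else st) (n, s)).2
      = (l.filter p).foldl PySem.Set.add s := by
  induction l generalizing n s with
  | nil => rfl
  | cons t rest ih =>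
    simp only [List.foldl_cons, List.filter_cons]
    by_cases hp : p t = true
    · by_cases hm : t ∈ s
      · simpa [hp, hm, PySem.Set.add] using ih n s
      · simpa [hp, hm, PySem.Set.union, PySem.Set.update, PySem.Set.add] using
          ih (n + 1) (PySem.Set.union s [t])
    · simpa [hp] using ih n s

-- in a (·≤·)-pairwise list every element is at most the last one
theorem mem_le_of_getLast? {l : List String} (h : l.Pairwise (· ≤ ·)) {a L : String}
    (ha : a ∈ l) (hL : l.getLast? = some L) : a ≤ L := by
  obtain ⟨l', rfl⟩ := List.getLast?_eq_some_iff.mp hL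
  rcases List.mem_append.mp ha with h' | h'
  · exact ((List.pairwise_append.mp h).2.2 a h' L (by simp))
  · simp only [List.mem_singleton] at h'
    exact le_of_eq h'

-- invariants of B's adjacent-dedup fold over a (·≤·)-pairwise list
theorem dedup_go (s : List String) :
    ∀ acc : List String, s.Pairwise (· ≤ ·) → acc.Pairwise (· < ·) →
      (∀ a ∈ acc, ∀ b ∈ s, a ≤ b) →
      (s.foldl (fun out t => if out.getLast? ≠ some t then out ++ [t] else out) acc).Pairwise (· < ·)
      ∧ ∀ x, x ∈ s.foldl (fun out t => if out.getLast? ≠ some t then out ++ [t] else out) acc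
              ↔ x ∈ acc ∨ x ∈ s := by
  induction s with
  | nil => intro acc _ hacc _; simpa using hacc
  | cons t rest ih =>
    intro acc hs hacc hle
    have hhead : ∀ b ∈ rest, t ≤ b := (List.pairwise_cons.mp hs).1
    have hrest : rest.Pairwise (· ≤ ·) := (List.pairwise_cons.mp hs).2
    simp only [List.foldl_cons]
    by_cases hlast : acc.getLast? = some t
    · -- skip: t is already the last kept element
      have htmem : t ∈ acc := List.mem_of_getLast? hlast
      rw [if_neg (by simp [hlast])]
      obtain ⟨h1, h2⟩ := ih acc hrest hacc
        (fun a ha b hb => hle a ha b (List.mem_cons_of_mem _ hb))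
      refine ⟨h1, fun x => ?_⟩
      rw [h2]
      constructor
      · rintro (h | h) <;> simp [h]
      · rintro (h | h)
        · exact Or.inl h
        · rcases List.mem_cons.mp h with h | h
          · exact Or.inl (h ▸ htmem)
          · exact Or.inr h
    · -- append t
      rw [if_pos (by simp [hlast])]
      have hlt : ∀ a ∈ acc, a < t := by
        intro a ha
        have hle' : a ≤ t := hle a ha t List.mem_cons_self
        rcases lt_or_eq_of_le hle' with h | h
        · exact h
        · exfalso
          subst h
          have hne : acc ≠ [] := List.ne_nil_of_mem ha
          have hL : acc.getLast? = some (acc.getLast hne) := List.getLast?_eq_some_getLast hne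
          have h1 : a ≤ acc.getLast hne := mem_le_of_getLast?
            (hacc.imp (fun h => le_of_lt h)) ha hL
          have h2 : acc.getLast hne ≤ a := hle _ (List.mem_of_getLast? hL) a List.mem_cons_self
          exact hlast (by rw [hL, le_antisymm h2 h1])
      have hacc' : (acc ++ [t]).Pairwise (· < ·) := by
        rw [List.pairwise_append]
        exact ⟨hacc, by simp, by simpa using hlt⟩
      have hle' : ∀ a ∈ acc ++ [t], ∀ b ∈ rest, a ≤ b := by
        intro a ha b hb
        rcases List.mem_append.mp ha with h | h
        · exact hle a h b (List.mem_cons_of_mem _ hb)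
        · simp only [List.mem_singleton] at h
          exact h ▸ hhead b hb
      obtain ⟨h1, h2⟩ := ih (acc ++ [t]) hrest hacc' hle'
      refine ⟨h1, fun x => ?_⟩
      rw [h2]
      simp only [List.mem_append, List.mem_cons]
      tauto

-- ===== VERDICT (by name: the statement is the Claim_ definition above) =====
theorem listOfVars_spec : Claim_equal_listOfVars := by
  intro tokens _
  simp only [Spec_listOfVars, listOfVars, listOfVars_alt]
  set p : String → Bool := fun t => t.toList.all PySem.Chars.isalpha with hp
  set l := tokens.filter p with hl
  -- A's set component = set(l)
  have hfold :
      (tokens.foldl (fun (st : Int × PySem.Set String) token =>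
        let isAlpha := token.toList.foldl (fun b c => if !(PySem.Chars.isalpha c) then false else b) true
        if isAlpha && !(PySem.Set.contains st.2 token) then
          (st.1 + 1, PySem.Set.union st.2 [token])
        else st) (0, PySem.Set.empty)).2
        = PySem.Set.ofList l := by
    have hfun : (fun (st : Int × PySem.Set String) token =>
        let isAlpha := token.toList.foldl (fun b c => if !(PySem.Chars.isalpha c) then false else b) true
        if isAlpha && !(PySem.Set.contains st.2 token) then
          (st.1 + 1, PySem.Set.union st.2 [token])
        else st)
        = (fun (st : Int × PySem.Set String) token =>
        if p token && !(PySem.Set.contains st.2 token) then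
          (st.1 + 1, PySem.Set.union st.2 [token])
        else st) := by
      funext st token
      simp only [innerFlag_eq_all, hp]
    rw [hfun, snd_foldA, PySem.Set.ofList_eq_foldl]
    rfl
  rw [hfold]
  -- B's final pass over sorted(l) is a strictly increasing list with set(l)'s elements
  set s := PySem.List.sorted l (fun x => x) false with hss
  have hsorted : s.Pairwise (· ≤ ·) := (PySem.List.sorted_pairwise l (fun x => x)).imp (fun h => h)
  obtain ⟨hpw, hmem⟩ := dedup_go s [] hsorted (by simp) (by simp)
  set r := s.foldl (fun out t => if out.getLast? ≠ some t then out ++ [t] else out) [] with hr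
  have hnodupr : r.Nodup := hpw.imp (fun h => ne_of_lt h)
  have hnodupo : (PySem.Set.ofList l).Nodup := PySem.Set.nodup_ofList l
  have hmemr : ∀ x, x ∈ r ↔ x ∈ PySem.Set.ofList l := by
    intro x
    rw [hmem x]
    simp [PySem.Set.mem_ofList, hss, PySem.List.mem_sorted]
  have hperm : r.Perm (PySem.Set.ofList l) :=
    (List.perm_ext_iff_of_nodup hnodupr hnodupo).mpr hmemr
  exact PySem.List.sorted_eq_of_perm_of_pairwise_lt (PySem.Set.ofList l) r (fun x => x) hperm hpw
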